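-- pv_equiv track=rewrite | github.com/gahjelle/advent_of_code | python/2017/09_stream_processing/aoc201709.py | separate_stream
-- ===== SOURCE A (Python) =====
-- def separate_stream(stream):
--     """Separate garbage from stream
--
--     Garbage is delimited by < and >. ! is used as an escape character.
--
--     >>> separate_stream("{<aoc!>,{},<!aoc>, {}}")
--     ('{, {}}', 'aoc,{},<oc')
--     """
--     len_stream = len(stream)
--     cleaned, garbage = [], []
--     currently_garbage = False
--
--     pointer = 0
--     while pointer < len_stream:
--         current_char = stream[pointer]
--         pointer += 1
--         match current_char:
--             case "!":
--                 pointer += 1  # Ignore next character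
--             case "<" if not currently_garbage:
--                 currently_garbage = True
--             case ">":
--                 currently_garbage = False
--             case _:
--                 (garbage if currently_garbage else cleaned).append(current_char)
--
--     return "".join(cleaned), "".join(garbage)
-- ===== SOURCE B (Python) =====
-- def separate_stream(stream):
--     # Pass 1: remove escapes — '!' drops itself and the following char.
--     kept = []
--     i = 0
--     n = len(stream)
--     while i < n:
--         if stream[i] == "!":
--             i += 2
--         else:
--             kept.append(stream[i])
--             i += 1
--     # Pass 2: garbage/clean state machine, no escape handling needed.
--     cleaned, garbage = [], []
--     in_garbage = False
--     for ch in kept: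
--         if ch == "<" and not in_garbage:
--             in_garbage = True
--         elif ch == ">":
--             in_garbage = False
--         elif in_garbage:
--             garbage.append(ch)
--         else:
--             cleaned.append(ch)
--     return "".join(cleaned), "".join(garbage)
-- ===== Notes on version B (the rewrite author's own statement) =====
-- stated objective: alternative
-- what changed: Replaced the single pointer-driven state machine that handles escapes inline with two sequential passes: an escape-stripping pass that deletes each '!' together with its following character, then a plain garbage/clean state machine with no escape case.
import Mathlib
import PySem

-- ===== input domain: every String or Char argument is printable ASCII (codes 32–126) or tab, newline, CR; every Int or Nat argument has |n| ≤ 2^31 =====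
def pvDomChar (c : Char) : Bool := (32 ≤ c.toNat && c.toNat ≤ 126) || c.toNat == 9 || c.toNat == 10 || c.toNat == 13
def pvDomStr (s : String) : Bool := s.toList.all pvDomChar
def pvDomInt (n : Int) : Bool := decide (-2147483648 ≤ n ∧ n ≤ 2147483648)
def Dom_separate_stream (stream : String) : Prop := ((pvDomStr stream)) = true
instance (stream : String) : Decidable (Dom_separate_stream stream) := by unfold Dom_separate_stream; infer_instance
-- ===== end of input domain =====

-- B replaces A's single escape-aware state machine by two passes (strip escapes, then a
-- plain garbage/clean machine); equivalence of the two decompositions is proved (alternative, same cost).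

-- ===== PORT A =====
-- A's while-loop: pointer walk over the stream; '!' advances the pointer an extra step,
-- accumulators `cleaned`/`garbage` are appended to at the back, flag `currently_garbage`.
def sepALoop : List Char → List Char → List Char → Bool → List Char × List Char
  | [], cleaned, garbage, _ => (cleaned, garbage)
  | c :: rest, cleaned, garbage, g =>
    if c = '!' then
      -- pointer += 1 (extra): skip the next character as well
      sepALoop (rest.drop 1) cleaned garbage g
    else if c = '<' ∧ g = false then
      sepALoop rest cleaned garbage true
    else if c = '>' then
      sepALoop rest cleaned garbage false
    else if g then
      sepALoop rest cleaned (garbage ++ [c]) g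
    else
      sepALoop rest (cleaned ++ [c]) garbage g
termination_by l => l.length
decreasing_by
  · simp
  all_goals simp

def separate_stream (stream : String) : String × String :=
  let r := sepALoop stream.toList [] [] false
  (String.ofList r.1, String.ofList r.2)

-- ===== PORT B =====
-- B pass 1: remove each '!' together with the character that follows it.
def stripEscapes : List Char → List Char
  | [] => []
  | c :: rest =>
    if c = '!' then stripEscapes (rest.drop 1)
    else c :: stripEscapes rest
termination_by l => l.length
decreasing_by
  · simp
  · simp

-- B pass 2: garbage/clean state machine with no escape case.
def sepBLoop : List Char → Bool → List Char × List Char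
  | [], _ => ([], [])
  | c :: rest, g =>
    if c = '<' ∧ g = false then sepBLoop rest true
    else if c = '>' then sepBLoop rest false
    else if g then
      let r := sepBLoop rest g
      (r.1, c :: r.2)
    else
      let r := sepBLoop rest g
      (c :: r.1, r.2)

def separate_stream_alt (stream : String) : String × String :=
  let r := sepBLoop (stripEscapes stream.toList) false
  (String.ofList r.1, String.ofList r.2)

-- ===== PRECONDITION & SPEC =====
def Spec_separate_stream (stream : String) (out : String × String) : Prop := out = separate_stream_alt stream
instance (stream : String) (out : String × String) : Decidable (Spec_separate_stream stream out) := by unfold Spec_separate_stream; infer_instance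

-- ===== CLAIM (what is proved, stated in full; the proofs are below) =====
def Claim_equal_separate_stream : Prop := ∀ (stream : String), Dom_separate_stream stream → Spec_separate_stream stream (separate_stream stream)

-- ===== LEMMAS AND PROOFS =====

theorem sepBLoop_gt (l : List Char) (g : Bool) :
    sepBLoop ('>' :: l) g = sepBLoop l false := by simp [sepBLoop]

theorem sepBLoop_other_true (c : Char) (l : List Char) (h : ¬ c = '>') :
    sepBLoop (c :: l) true = ((sepBLoop l true).1, c :: (sepBLoop l true).2) := by
  simp [sepBLoop, h]

theorem sepBLoop_other_false (c : Char) (l : List Char) (h1 : ¬ c = '<') (h2 : ¬ c = '>') :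
    sepBLoop (c :: l) false = (c :: (sepBLoop l false).1, (sepBLoop l false).2) := by
  simp [sepBLoop, h1, h2]

-- A's accumulator loop on s equals B's two passes, prefixed by the accumulators.
theorem sepALoop_eq (s : List Char) (cleaned garbage : List Char) (g : Bool) :
    sepALoop s cleaned garbage g =
      (cleaned ++ (sepBLoop (stripEscapes s) g).1,
       garbage ++ (sepBLoop (stripEscapes s) g).2) := by
  fun_induction sepALoop s cleaned garbage g with
  | case1 cleaned garbage g => simp [stripEscapes, sepBLoop]
  | case2 rest cleaned garbage g ih =>
      rw [ih]; simp [stripEscapes]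
  | case3 c rest cleaned garbage g h1 h2 ih =>
      rw [ih]
      obtain ⟨hc, hg⟩ := h2
      subst hc hg
      simp [stripEscapes, sepBLoop]
  | case4 rest cleaned garbage g h1 h2 ih =>
      rw [ih]
      simp only [not_and] at h2
      rw [stripEscapes]
      simp only [if_neg h1]
      rw [sepBLoop_gt]
  | case5 c rest cleaned garbage h1 h2 h3 ih =>
      rw [ih]
      rw [stripEscapes]
      simp only [if_neg h1]
      rw [sepBLoop_other_true c _ h2]
      simp
  | case6 c rest cleaned garbage g h1 h2 h3 h4 ih =>
      rw [ih]
      rw [stripEscapes]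
      simp only [if_neg h1]
      simp only [not_and] at h2
      have hg : g = false := by simpa using h4
      subst hg
      have hcc : ¬ c = '<' := fun h => (h2 h) rfl
      rw [sepBLoop_other_false c _ hcc h3]
      simp

-- ===== VERDICT (by name: the statement is the Claim_ definition above) =====
theorem separate_stream_spec : Claim_equal_separate_stream := by
  intro stream _
  unfold Spec_separate_stream separate_stream separate_stream_alt
  rw [sepALoop_eq]
  simp
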